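-- pv_equiv track=rewrite | github.com/tairenfd/audiodotturn | AudioDotTurn.py | form_or_not
-- ===== SOURCE A (Python) =====
-- def form_or_not(files_list: list):
--     formatted = ['\n## Formatted:']
--     not_formatted = ['\n## Not Formatted:']
--     already_formatted = ['\n## No Change:']
--     for file in files_list:
--         if file.startswith('*****'):
--             not_formatted.append(f"    - {file.lstrip('*')}")
--         elif file.startswith('$$'):
--             already_formatted.append(f"    - {file.lstrip('$$')}")
--         else:
--             formatted.append(f'    - {file}')
--     stats = [
--         f'\n### Number of files formatted: {len(formatted) - 1}',
--         f'\n### Number of files unable to be formatted: {len(not_formatted) - 1}',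
--         f'\n### Number of files unchanged: {len(already_formatted) - 1}'
--     ]
--
--     return formatted, not_formatted, already_formatted, stats
-- ===== SOURCE B (Python) =====
-- def form_or_not(files_list: list):
--     # Sort-then-slice: stably sort by category rank, then cut the three
--     # contiguous groups out of the sorted list (stable sort keeps A's order).
--     def category(f):
--         if f.startswith('*****'):
--             return 1
--         if f.startswith('$$'):
--             return 2
--         return 0
--
--     keys = [category(f) for f in files_list]
--     c0 = keys.count(0)
--     c1 = keys.count(1)
--     ordered = sorted(files_list, key=category)
--     formatted = ['\n## Formatted:'] + [f'    - {f}' for f in ordered[:c0]]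
--     not_formatted = ['\n## Not Formatted:'] + [
--         f"    - {f.lstrip('*')}" for f in ordered[c0:c0 + c1]]
--     already_formatted = ['\n## No Change:'] + [
--         f"    - {f.lstrip('$')}" for f in ordered[c0 + c1:]]
--     stats = [
--         f'\n### Number of files formatted: {len(formatted) - 1}',
--         f'\n### Number of files unable to be formatted: {len(not_formatted) - 1}',
--         f'\n### Number of files unchanged: {len(already_formatted) - 1}'
--     ]
--     return formatted, not_formatted, already_formatted, stats
-- ===== Notes on version B (the rewrite author's own statement) =====
-- stated objective: alternative
-- what changed: Replaces A's single three-way dispatching loop over mutable accumulators with a stable sort of the files by category rank followed by slicing the sorted list into the three contiguous groups (sort-then-slice bucketing; stability preserves A's per-category order).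
import Mathlib
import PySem

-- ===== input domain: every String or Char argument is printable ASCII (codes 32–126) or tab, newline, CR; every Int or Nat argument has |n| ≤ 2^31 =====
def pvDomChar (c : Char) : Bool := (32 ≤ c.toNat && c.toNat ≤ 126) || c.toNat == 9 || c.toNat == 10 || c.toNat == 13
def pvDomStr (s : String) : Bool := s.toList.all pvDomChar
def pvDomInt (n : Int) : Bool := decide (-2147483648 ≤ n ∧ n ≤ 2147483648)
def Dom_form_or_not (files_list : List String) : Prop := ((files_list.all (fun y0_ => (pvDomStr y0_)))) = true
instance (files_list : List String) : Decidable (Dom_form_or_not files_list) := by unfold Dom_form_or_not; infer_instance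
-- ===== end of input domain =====

-- B replaces A's single three-way dispatching loop with a stable sort by category
-- rank followed by slicing the three contiguous groups out of the sorted list
-- (objective: alternative algorithm; same output).

-- s.lstrip(chars): drop leading characters that are in chars (exact CPython semantics on all inputs)
def pyLstripChars (s : String) (chars : List Char) : String :=
  String.ofList (s.toList.dropWhile (fun c => c ∈ chars))

-- ===== PORT A =====
-- the for-loop of A: one pass, appending to whichever of the three lists the branch picks
def formLoop (files_list : List String)
    (st : List String × List String × List String) :
    List String × List String × List String :=
  match files_list with
  | [] => st
  | file :: rest =>
    let (f, nf, af) := st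
    if PySem.Str.startswith file "*****" then
      formLoop rest (f, nf ++ ["    - " ++ pyLstripChars file ['*']], af)
    else if PySem.Str.startswith file "$$" then
      formLoop rest (f, nf, af ++ ["    - " ++ pyLstripChars file ['$']])
    else
      formLoop rest (f ++ ["    - " ++ file], nf, af)

def form_or_not (files_list : List String) : List String × List String × List String × List String :=
  let st := formLoop files_list (["\n## Formatted:"], ["\n## Not Formatted:"], ["\n## No Change:"])
  let formatted := st.1
  let not_formatted := st.2.1
  let already_formatted := st.2.2
  let stats := [
    "\n### Number of files formatted: " ++ PySem.Int.toStr ((formatted.length : Int) - 1),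
    "\n### Number of files unable to be formatted: " ++ PySem.Int.toStr ((not_formatted.length : Int) - 1),
    "\n### Number of files unchanged: " ++ PySem.Int.toStr ((already_formatted.length : Int) - 1)]
  (formatted, not_formatted, already_formatted, stats)

-- ===== PORT B =====
-- B's category(f): rank 1 for '*****'-prefixed, 2 for '$$'-prefixed, 0 otherwise
def pvCategory (f : String) : Int :=
  if PySem.Str.startswith f "*****" then 1
  else if PySem.Str.startswith f "$$" then 2
  else 0

def form_or_not_alt (files_list : List String) : List String × List String × List String × List String :=
  let keys := files_list.map pvCategory
  let c0 : Int := PySem.List.count keys 0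
  let c1 : Int := PySem.List.count keys 1
  let ordered := PySem.List.sorted files_list pvCategory
  let formatted := "\n## Formatted:" ::
    (PySem.List.slice ordered none (some c0)).map (fun f => "    - " ++ f)
  let not_formatted := "\n## Not Formatted:" ::
    (PySem.List.slice ordered (some c0) (some (c0 + c1))).map
      (fun f => "    - " ++ pyLstripChars f ['*'])
  let already_formatted := "\n## No Change:" ::
    (PySem.List.slice ordered (some (c0 + c1)) none).map
      (fun f => "    - " ++ pyLstripChars f ['$'])
  let stats := [
    "\n### Number of files formatted: " ++ PySem.Int.toStr ((formatted.length : Int) - 1),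
    "\n### Number of files unable to be formatted: " ++ PySem.Int.toStr ((not_formatted.length : Int) - 1),
    "\n### Number of files unchanged: " ++ PySem.Int.toStr ((already_formatted.length : Int) - 1)]
  (formatted, not_formatted, already_formatted, stats)

-- ===== PRECONDITION & SPEC =====
def Spec_form_or_not (files_list : List String) (out : List String × List String × List String × List String) : Prop := out = form_or_not_alt files_list
instance (files_list : List String) (out : List String × List String × List String × List String) : Decidable (Spec_form_or_not files_list out) := by unfold Spec_form_or_not; infer_instance

-- ===== CLAIM (what is proved, stated in full; the proofs are below) =====
def Claim_equal_form_or_not : Prop := ∀ (files_list : List String), Dom_form_or_not files_list → Spec_form_or_not files_list (form_or_not files_list)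

-- ===== LEMMAS AND PROOFS =====

-- a string starting with '*****' cannot start with '$$'
theorem sw_excl (x : String) (h : PySem.Chars.startswith x.toList ['*','*','*','*','*']) :
    ¬ PySem.Chars.startswith x.toList ['$','$'] = true := by
  rw [PySem.Chars.startswith_iff] at h ⊢
  intro h2
  obtain ⟨t1, e1⟩ := h
  obtain ⟨t2, e2⟩ := h2
  rw [← e1] at e2; simp at e2

-- A's loop produces the three filter-and-map lists
theorem formLoop_eq (files_list : List String) (f nf af : List String) :
    formLoop files_list (f, nf, af) =
      (f ++ (files_list.filter (fun s => pvCategory s == 0)).map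
              (fun s => "    - " ++ s),
       nf ++ (files_list.filter (fun s => pvCategory s == 1)).map
               (fun s => "    - " ++ pyLstripChars s ['*']),
       af ++ (files_list.filter (fun s => pvCategory s == 2)).map
               (fun s => "    - " ++ pyLstripChars s ['$'])) := by
  induction files_list generalizing f nf af with
  | nil => simp [formLoop]
  | cons x rest ih =>
    by_cases h1 : PySem.Chars.startswith x.toList ['*','*','*','*','*']
    · have h2 := sw_excl x h1
      simp [formLoop, pvCategory, h1, ih]
    · by_cases h2 : PySem.Chars.startswith x.toList ['$','$']
      · simp [formLoop, pvCategory, h1, h2, ih]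
      · simp [formLoop, pvCategory, h1, h2, ih]

theorem pvCategory_mem (f : String) : pvCategory f = 0 ∨ pvCategory f = 1 ∨ pvCategory f = 2 := by
  unfold pvCategory; split_ifs <;> simp

-- inserting x between a prefix of not-greater keys and a suffix of strictly greater keys
theorem insertBy_mid (x : String) (as bs : List String)
    (ha : ∀ a ∈ as, ¬ pvCategory x < pvCategory a)
    (hb : ∀ b ∈ bs, pvCategory x < pvCategory b) :
    PySem.List.insertBy (fun a b => decide (pvCategory a < pvCategory b)) x (as ++ bs)
      = as ++ x :: bs := by
  induction as with
  | nil =>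
    cases bs with
    | nil => simp [PySem.List.insertBy]
    | cons b bs => simp [PySem.List.insertBy, hb b (by simp)]
  | cons a as ih =>
    have hxa : ¬ pvCategory x < pvCategory a := ha a (by simp)
    simp [List.cons_append, PySem.List.insertBy, hxa,
      ih (fun a' h => ha a' (by simp [h]))]

-- the insertion-sort fold keeps the three category buckets in order
theorem foldl_ins_eq (files : List String) (a0 a1 a2 : List String)
    (h0 : ∀ f ∈ a0, pvCategory f = 0) (h1 : ∀ f ∈ a1, pvCategory f = 1)
    (h2 : ∀ f ∈ a2, pvCategory f = 2) :
    files.foldl (fun acc x => PySem.List.insertBy (fun a b => decide (pvCategory a < pvCategory b)) x acc)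
        (a0 ++ a1 ++ a2) =
      (a0 ++ files.filter (fun f => pvCategory f == 0)) ++
      (a1 ++ files.filter (fun f => pvCategory f == 1)) ++
      (a2 ++ files.filter (fun f => pvCategory f == 2)) := by
  induction files generalizing a0 a1 a2 with
  | nil => simp
  | cons x rest ih =>
    rcases pvCategory_mem x with hc | hc | hc
    · have hins : PySem.List.insertBy (fun a b => decide (pvCategory a < pvCategory b)) x (a0 ++ a1 ++ a2)
          = (a0 ++ [x]) ++ a1 ++ a2 := by
        rw [List.append_assoc, insertBy_mid x a0 (a1 ++ a2)
          (fun a h => by rw [hc, h0 a h]; omega)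
          (fun b h => by rcases List.mem_append.1 h with h' | h'
                         · rw [hc, h1 b h']; omega
                         · rw [hc, h2 b h']; omega)]
        simp
      simp only [List.foldl_cons, hins]
      rw [ih (a0 ++ [x]) a1 a2
        (fun f h => by rcases List.mem_append.1 h with h' | h'
                       · exact h0 f h'
                       · simp at h'; subst h'; exact hc) h1 h2]
      simp [hc]
    · have hins : PySem.List.insertBy (fun a b => decide (pvCategory a < pvCategory b)) x (a0 ++ a1 ++ a2)
          = a0 ++ (a1 ++ [x]) ++ a2 := by
        rw [insertBy_mid x (a0 ++ a1) a2
          (fun a h => by rcases List.mem_append.1 h with h' | h'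
                         · rw [hc, h0 a h']; omega
                         · rw [hc, h1 a h']; omega)
          (fun b h => by rw [hc, h2 b h]; omega)]
        simp
      simp only [List.foldl_cons, hins]
      rw [ih a0 (a1 ++ [x]) a2 h0
        (fun f h => by rcases List.mem_append.1 h with h' | h'
                       · exact h1 f h'
                       · simp at h'; subst h'; exact hc) h2]
      simp [hc]
    · have hins : PySem.List.insertBy (fun a b => decide (pvCategory a < pvCategory b)) x (a0 ++ a1 ++ a2)
          = a0 ++ a1 ++ (a2 ++ [x]) := by
        rw [PySem.List.insertBy_of_forall_not_before _ x (a0 ++ a1 ++ a2)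
          (fun a h => by
            rcases List.mem_append.1 h with h' | h'
            · rcases List.mem_append.1 h' with h'' | h''
              · rw [hc, h0 a h'']; simp
              · rw [hc, h1 a h'']; simp
            · rw [hc, h2 a h']; simp)]
        simp
      simp only [List.foldl_cons, hins]
      rw [ih a0 a1 (a2 ++ [x]) h0 h1
        (fun f h => by rcases List.mem_append.1 h with h' | h'
                       · exact h2 f h'
                       · simp at h'; subst h'; exact hc)]
      simp [hc]

-- the stable sort by category is exactly the three filters concatenated
theorem sorted_cat_eq (files : List String) :
    PySem.List.sorted files pvCategory =
      files.filter (fun f => pvCategory f == 0) ++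
      files.filter (fun f => pvCategory f == 1) ++
      files.filter (fun f => pvCategory f == 2) := by
  rw [PySem.List.sorted_eq_foldl_insertBy]
  have := foldl_ins_eq files [] [] [] (by simp) (by simp) (by simp)
  simpa using this

theorem count_map_cat (files : List String) (v : Int) :
    PySem.List.count (files.map pvCategory) v = (files.filter (fun f => pvCategory f == v)).length := by
  rw [PySem.List.count_eq, List.count_eq_countP, List.countP_map, Function.comp_def]
  exact List.countP_eq_length_filter

-- ===== VERDICT (by name: the statement is the Claim_ definition above) =====
theorem form_or_not_spec : Claim_equal_form_or_not := by
  intro files_list _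
  show form_or_not files_list = form_or_not_alt files_list
  have hs := sorted_cat_eq files_list
  have hc0 := count_map_cat files_list 0
  have hc1 := count_map_cat files_list 1
  simp only [form_or_not, form_or_not_alt, formLoop_eq, hs, hc0, hc1]
  set F0 := files_list.filter (fun f => pvCategory f == 0) with hF0
  set F1 := files_list.filter (fun f => pvCategory f == 1) with hF1
  set F2 := files_list.filter (fun f => pvCategory f == 2) with hF2
  have e1 : PySem.List.slice (F0 ++ F1 ++ F2) none (some (F0.length : Int)) = F0 := by
    rw [PySem.List.slice_to_natCast, List.append_assoc, List.take_left]
  have e2 : PySem.List.slice (F0 ++ F1 ++ F2) (some (F0.length : Int))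
      (some ((F0.length : Int) + (F1.length : Int))) = F1 := by
    rw [PySem.List.slice_natCast_add, List.append_assoc, List.drop_left,
      List.take_left]
  have e3 : PySem.List.slice (F0 ++ F1 ++ F2) (some ((F0.length : Int) + (F1.length : Int))) none = F2 := by
    have : (F0.length : Int) + (F1.length : Int) = ((F0.length + F1.length : Nat) : Int) := by push_cast; ring
    rw [this, PySem.List.slice_from_natCast,
      show F0.length + F1.length = (F0 ++ F1).length by simp, List.drop_left]
  rw [e1, e2, e3]
  simp
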